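-- pv_equiv track=rewrite | github.com/ggoolsby/CS-101-HW | HW10/GrayGoolsby_HW10.py | mailbox
-- ===== SOURCE A (Python) =====
-- def mailbox(n):
--     """returns a list of mailbox numbers that are closed after every 2nd is opened, /
--     then every 3rd, up to every nth box is opened"""
--     boxes=[0]*(n+1)
--     list=[]
--     start=0
--     every=1
--     for j in range(0, len(boxes)):
--         start+=1
--         every+=1
--         for x in range(start, len(boxes), every):
--             if boxes[x]==0:
--                 boxes[x]=1
--             else:
--                 boxes[x]=0
--     for m,h in enumerate(boxes):
--         if h==0:
--             list.append(m)
--     return list[1:]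
-- ===== SOURCE B (Python) =====
-- def mailbox(n):
--     """returns a list of mailbox numbers that are closed after every 2nd is opened, /
--     then every 3rd, up to every nth box is opened"""
--     # box m stays closed iff m+1 has an odd number of divisors, i.e. m+1 is a
--     # perfect square; so just emit k*k-1 for k = 2, 3, ... while k*k-1 <= n.
--     res = []
--     k = 2
--     while k * k - 1 <= n:
--         res.append(k * k - 1)
--         k += 1
--     return res
-- ===== Notes on version B (the rewrite author's own statement) =====
-- stated objective: faster
-- what changed: B replaces A's O(n log n) toggling sieve over an n+1 element box array by directly emitting k*k-1 for k = 2, 3, ... while k*k-1 <= n, using the fact that a box stays closed iff its number plus one has an odd number of divisors, i.e. is a perfect square.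
import Mathlib
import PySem

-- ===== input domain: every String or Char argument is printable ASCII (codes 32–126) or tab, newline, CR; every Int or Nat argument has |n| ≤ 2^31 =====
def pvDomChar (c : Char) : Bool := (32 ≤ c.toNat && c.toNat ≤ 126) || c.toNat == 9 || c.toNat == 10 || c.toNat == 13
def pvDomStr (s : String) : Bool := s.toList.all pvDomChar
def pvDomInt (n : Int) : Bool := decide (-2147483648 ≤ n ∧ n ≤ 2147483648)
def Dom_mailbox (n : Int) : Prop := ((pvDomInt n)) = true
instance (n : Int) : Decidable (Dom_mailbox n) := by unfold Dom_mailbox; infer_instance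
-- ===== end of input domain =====

-- B replaces A's O(n log n) toggling sieve by direct enumeration of the closed boxes
-- k*k-1 (a box stays closed iff its number plus one is a perfect square): objective faster.

-- ===== PORT A =====
-- 'if boxes[x]==0: boxes[x]=1 else: boxes[x]=0'; the read boxes[x] is exact via pyGet?
-- (in A the index x is always in range, so the 'none' branch is never taken).
def pvToggle (bs : List Int) (x : Int) : List Int :=
  match PySem.List.pyGet? bs x with
  | some v => bs.set x.toNat (if v = 0 then 1 else 0)
  | none => bs

-- one iteration of the outer 'for j in range(0, len(boxes))' loop; len(boxes) is the
-- constant L (List.set keeps the length, as Python item assignment does).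
def pvOuterStep (L : Int) (st : Int × Int × List Int) : Int × Int × List Int :=
  let start := st.1 + 1
  let every := st.2.1 + 1
  (start, every, (PySem.List.pyRange start L every).foldl pvToggle st.2.2)

def mailbox (n : Int) : List Int :=
  let boxes : List Int := List.replicate (n + 1).toNat 0   -- [0]*(n+1)
  let L : Int := (boxes.length : Int)
  let final := (PySem.List.pyRange 0 L 1).foldl (fun st _j => pvOuterStep L st) (0, 1, boxes)
  let lst := (PySem.List.enumerate final.2.2).foldl
      (fun acc (p : Int × Int) => if p.2 = 0 then acc ++ [p.1] else acc) []
  PySem.List.slice lst (some 1) none   -- list[1:]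

-- ===== PORT B =====
-- termination helper for the 'while k*k-1 <= n' loop (k grows, k ≤ k*k ≤ n+1)
theorem pvSelfLeSq (k : Int) : k ≤ k * k := by nlinarith [mul_self_nonneg k, mul_self_nonneg (k - 1)]

def mailboxAltGo (n k : Int) (acc : List Int) : List Int :=
  if k * k - 1 ≤ n then mailboxAltGo n (k + 1) (acc ++ [k * k - 1]) else acc
termination_by (n + 2 - k).toNat
decreasing_by have := pvSelfLeSq k; omega

def mailbox_alt (n : Int) : List Int := mailboxAltGo n 2 []

-- ===== PRECONDITION & SPEC =====
def Spec_mailbox (n : Int) (out : List Int) : Prop := out = mailbox_alt n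
instance (n : Int) (out : List Int) : Decidable (Spec_mailbox n out) := by unfold Spec_mailbox; infer_instance

-- ===== CLAIM (what is proved, stated in full; the proofs are below) =====
def Claim_equal_mailbox : Prop := ∀ (n : Int), Dom_mailbox n → Spec_mailbox n (mailbox n)

-- ===== LEMMAS AND PROOFS =====

-- flip of a stored 0/1 value
theorem pvToggle_length (bs : List Int) (x : Int) : (pvToggle bs x).length = bs.length := by
  unfold pvToggle
  cases h : PySem.List.pyGet? bs x <;> simp

theorem pvToggle_getD (bs : List Int) (x : Int) (hx0 : 0 ≤ x) (hx : x < (bs.length : Int))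
    (y : Nat) :
    (pvToggle bs x).getD y 0 =
      if (y : Int) = x then (if bs.getD y 0 = 0 then 1 else 0) else bs.getD y 0 := by
  have hxl : x.toNat < bs.length := by omega
  have h := PySem.List.pyGet?_eq_some_getElem (xs := bs) (i := x) hx0 (by simpa using hx)
  unfold pvToggle
  rw [h]
  by_cases hyx : (y : Int) = x
  · have hxy : x.toNat = y := by omega
    subst hxy
    simp [List.getD_eq_getElem?_getD, hxl, hyx]
  · have hxy : x.toNat ≠ y := by omega
    simp [List.getD_eq_getElem?_getD, hxy, hyx]

-- effect of the inner 'for x in range(start, len(boxes), every)' loop, for any list of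
-- distinct in-range indices
theorem foldl_pvToggle_length (xs : List Int) (bs : List Int) :
    (xs.foldl pvToggle bs).length = bs.length := by
  induction xs generalizing bs with
  | nil => rfl
  | cons x xs ih => simpa [List.foldl_cons, pvToggle_length] using ih (pvToggle bs x)

theorem foldl_pvToggle_getD (xs : List Int) (bs : List Int)
    (hxs : ∀ x ∈ xs, 0 ≤ x ∧ x < (bs.length : Int)) (hnd : xs.Nodup) (y : Nat) :
    (xs.foldl pvToggle bs).getD y 0 =
      if (y : Int) ∈ xs then (if bs.getD y 0 = 0 then 1 else 0) else bs.getD y 0 := by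
  induction xs generalizing bs with
  | nil => simp
  | cons x xs ih =>
    obtain ⟨hx0, hxL⟩ := hxs x (List.mem_cons_self ..)
    have hnd' := hnd
    rw [List.nodup_cons] at hnd'
    obtain ⟨hxnot, hndtail⟩ := hnd'
    rw [List.foldl_cons]
    rw [ih (pvToggle bs x)
      (fun z hz => by
        have := hxs z (List.mem_cons_of_mem _ hz)
        simpa [pvToggle_length] using this) hndtail]
    rw [pvToggle_getD bs x hx0 hxL y]
    by_cases hmem : (y : Int) ∈ xs
    · have hne : (y : Int) ≠ x := fun h => hxnot (h ▸ hmem)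
      simp [hmem, hne]
    · by_cases hyx : (y : Int) = x
      · simp [hyx]
        exact fun h => absurd h hxnot
      · simp [hmem, hyx]

theorem pyRange_nodup_of_pos (a b s : Int) (hs : 0 < s) : (PySem.List.pyRange a b s).Nodup := by
  rw [PySem.List.pyRange_of_pos a b hs]
  refine List.Nodup.map ?_ List.nodup_range
  intro k1 k2 h
  have : s * (k1 : Int) = s * (k2 : Int) := by linarith
  have : (k1 : Int) = k2 := by
    exact mul_left_cancel₀ (by omega) this
  omega

-- the number of passes among the first m that toggle box y
def pvTogCount (L : Int) (m : Nat) (y : Nat) : Nat :=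
  (List.range m).countP
    (fun (j : Nat) => decide ((y : Int) ∈ PySem.List.pyRange ((j : Int) + 1) L ((j : Int) + 2)))

theorem foldl_const {α β : Type} (l : List β) (F : α → α) (init : α) :
    l.foldl (fun st _ => F st) init = F^[l.length] init := by
  induction l generalizing init with
  | nil => rfl
  | cons x xs ih => simpa [Function.iterate_succ_apply] using ih (F init)

-- state of the outer loop after m iterations
theorem pvOuter_iterate (L : Int) (hL : L = ((L.toNat : Int))) (m : Nat) :
    (pvOuterStep L)^[m] (0, 1, List.replicate L.toNat 0) =
      ((m : Int), (m : Int) + 1,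
        ((pvOuterStep L)^[m] (0, 1, List.replicate L.toNat 0)).2.2) ∧
    ((pvOuterStep L)^[m] (0, 1, List.replicate L.toNat 0)).2.2.length = L.toNat ∧
    ∀ y : Nat, ((pvOuterStep L)^[m] (0, 1, List.replicate L.toNat 0)).2.2.getD y 0 =
      if Even (pvTogCount L m y) then 0 else 1 := by
  induction m with
  | zero =>
    refine ⟨by simp, by simp, ?_⟩
    intro y
    by_cases hy : y < L.toNat <;>
      simp [pvTogCount, List.getD_eq_getElem?_getD, hy]
  | succ m ih =>
    obtain ⟨heq, hlen, hval⟩ := ih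
    rw [Function.iterate_succ_apply', heq]
    simp only [pvOuterStep]
    have h21 : (m : Int) + 1 + 1 = (m : Int) + 2 := by ring
    rw [h21]
    have hnd := pyRange_nodup_of_pos ((m : Int) + 1) L ((m : Int) + 2) (by omega)
    have hbnd : ∀ x ∈ PySem.List.pyRange ((m : Int) + 1) L ((m : Int) + 2),
        0 ≤ x ∧ x < ((((pvOuterStep L)^[m] (0, 1, List.replicate L.toNat 0)).2.2).length : Int) := by
      intro x hx
      rw [PySem.List.mem_pyRange_iff_of_pos (by omega)] at hx
      rw [hlen]
      omega
    refine ⟨by push_cast; ring_nf, by rw [foldl_pvToggle_length, hlen], ?_⟩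
    intro y
    rw [foldl_pvToggle_getD _ _ hbnd hnd y, hval y]
    have hcount : pvTogCount L (m + 1) y =
        pvTogCount L m y +
          (if (y : Int) ∈ PySem.List.pyRange ((m : Int) + 1) L ((m : Int) + 2) then 1 else 0) := by
      unfold pvTogCount
      rw [List.range_succ, List.countP_append]
      simp
    rw [hcount]
    by_cases hmem : (y : Int) ∈ PySem.List.pyRange ((m : Int) + 1) L ((m : Int) + 2) <;>
      by_cases hev : Even (pvTogCount L m y) <;>
        simp [hmem, hev, Nat.even_add_one]

-- ===== number theory: box y stays 0 iff y+1 is a perfect square =====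

-- a fixed-point-free involution on a finite set forces an even cardinality
theorem even_card_of_involution (s : Finset ℕ) (g : ℕ → ℕ) (hmem : ∀ a ∈ s, g a ∈ s)
    (hinv : ∀ a ∈ s, g (g a) = a) (hfix : ∀ a ∈ s, g a ≠ a) : Even s.card := by
  have hsum : (∑ _x ∈ s, (1 : ZMod 2)) = 0 :=
    Finset.sum_involution (fun a _ => g a)
      (fun a ha => by decide)
      (fun a ha _ => hfix a ha) (fun a ha => hmem a ha) (fun a ha => hinv a ha)
  rw [Finset.sum_const, nsmul_eq_mul, mul_one] at hsum
  exact ZMod.natCast_eq_zero_iff_even.1 hsum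

theorem odd_card_divisors_iff (N : ℕ) (hN : N ≠ 0) : Odd N.divisors.card ↔ IsSquare N := by
  have hdvd : ∀ d ∈ N.divisors, N / d ∈ N.divisors := by
    intro d hd
    rw [Nat.mem_divisors] at hd ⊢
    exact ⟨⟨d, (Nat.div_mul_cancel hd.1).symm⟩, hN⟩
  have hdpos : ∀ d ∈ N.divisors, 0 < d := fun d hd => Nat.pos_of_mem_divisors hd
  have hinv : ∀ d ∈ N.divisors, N / (N / d) = d := by
    intro d hd
    rw [Nat.mem_divisors] at hd
    exact Nat.div_div_self hd.1 hN
  have hdiv_eq : ∀ d ∈ N.divisors, ∀ k : ℕ, (N / d = k ↔ N = k * d) := by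
    intro d hd k
    have hpos := Nat.pos_of_mem_divisors hd
    have hdvdN := (Nat.mem_divisors.1 hd).1
    constructor
    · rintro rfl; exact (Nat.div_mul_cancel hdvdN).symm
    · rintro h
      rw [h]
      exact Nat.mul_div_cancel _ hpos
  constructor
  · intro hodd
    by_contra hsq
    have : Even N.divisors.card := by
      refine even_card_of_involution _ (fun d => N / d) hdvd hinv ?_
      intro d hd hfixd
      exact hsq ⟨d, by
        have := (hdiv_eq d hd d).1 hfixd
        omega⟩
    exact (Nat.not_even_iff_odd.2 hodd) this
  · rintro ⟨k, hk⟩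
    have hk' : N = k * k := hk
    have hkmem : k ∈ N.divisors := Nat.mem_divisors.2 ⟨⟨k, hk'⟩, hN⟩
    have heven : Even (N.divisors.erase k).card := by
      refine even_card_of_involution _ (fun d => N / d) ?_ ?_ ?_
      · intro d hd
        have hd' := Finset.mem_of_mem_erase hd
        refine Finset.mem_erase.2 ⟨?_, hdvd d hd'⟩
        intro hcon
        have : N = k * d := (hdiv_eq d hd' k).1 hcon
        have hkpos : 0 < k := by
          rcases Nat.eq_zero_or_pos k with h0 | h0
          · subst h0; simp at hk'; exact absurd hk' hN
          · exact h0
        have hdk : d = k := Nat.eq_of_mul_eq_mul_left hkpos (hk' ▸ this).symm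
        exact (Finset.mem_erase.1 hd).1 hdk
      · intro d hd; exact hinv d (Finset.mem_of_mem_erase hd)
      · intro d hd hcon
        have hd' := Finset.mem_of_mem_erase hd
        have : N = d * d := (hdiv_eq d hd' d).1 hcon
        have hdk : d = k := by
          have h2 : k * k = d * d := hk' ▸ this
          nlinarith
        exact (Finset.mem_erase.1 hd).1 hdk
    have := Finset.card_erase_of_mem hkmem
    have hpos : 0 < N.divisors.card := Finset.card_pos.2 ⟨k, hkmem⟩
    rw [← Nat.not_even_iff_odd]
    intro hevenN
    rw [this] at heven
    rcases heven with ⟨t, ht⟩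
    rcases hevenN with ⟨u, hu⟩
    omega

theorem countP_range_eq_card_filter (M : ℕ) (p : ℕ → Bool) :
    (List.range M).countP p = ((Finset.range M).filter (fun j => p j = true)).card := by
  induction M with
  | zero => rfl
  | succ M ih =>
    rw [List.range_succ, List.countP_append, Finset.range_add_one, Finset.filter_insert]
    by_cases hp : p M = true
    · rw [if_pos hp, Finset.card_insert_of_notMem (by simp)]
      simp [hp, ih]
    · rw [if_neg hp]
      simp [hp, ih]

theorem even_togCount_iff (L : Int) (y : Nat) (hy : (y : Int) < L) :
    Even (pvTogCount L L.toNat y) ↔ IsSquare (y + 1) := by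
  have hyM : y < L.toNat := by omega
  have hN0 : y + 1 ≠ 0 := by omega
  -- the toggling passes hitting box y are exactly the divisors ≥ 2 of y+1
  have hcard : pvTogCount L L.toNat y = ((y + 1).divisors.filter (fun d => 2 ≤ d)).card := by
    rw [pvTogCount, countP_range_eq_card_filter]
    refine Finset.card_bij (fun j _ => j + 2) ?_ ?_ ?_
    · intro j hj
      simp only [Finset.mem_filter, Finset.mem_range, decide_eq_true_eq] at hj
      obtain ⟨hjM, hjmem⟩ := hj
      rw [PySem.List.mem_pyRange_iff_of_pos (by omega)] at hjmem
      obtain ⟨h1, h2, h3⟩ := hjmem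
      have hdvd : ((j : Int) + 2) ∣ ((y : Int) + 1) := by
        have : ((y : Int) + 1) = ((y : Int) - ((j : Int) + 1)) + ((j : Int) + 2) := by ring
        rw [this]
        exact dvd_add h3 dvd_rfl
      have hdvdN : (j + 2) ∣ (y + 1) := by exact_mod_cast hdvd
      simp only [Finset.mem_filter, Nat.mem_divisors]
      exact ⟨⟨hdvdN, hN0⟩, by omega⟩
    · intro j1 h1 j2 h2 h
      simp only at h
      omega
    · intro d hd
      simp only [Finset.mem_filter, Nat.mem_divisors] at hd
      obtain ⟨⟨hdvd, _⟩, h2d⟩ := hd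
      have hdle : d ≤ y + 1 := Nat.le_of_dvd (by omega) hdvd
      refine ⟨d - 2, ?_, by show d - 2 + 2 = d; omega⟩
      simp only [Finset.mem_filter, Finset.mem_range, decide_eq_true_eq]
      refine ⟨by omega, ?_⟩
      rw [PySem.List.mem_pyRange_iff_of_pos (by omega)]
      refine ⟨by omega, hy, ?_⟩
      have : ((y : Int) - (((d : ℕ) - 2 : ℕ) + 1 : Int)) = ((y : Int) + 1) - ((((d : ℕ) - 2 : ℕ) : Int) + 2) := by ring
      have hdvdZ : (((d : ℕ) : Int)) ∣ ((y : Int) + 1) := by exact_mod_cast hdvd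
      have hcast : ((((d : ℕ) - 2 : ℕ) : Int) + 2) = ((d : ℕ) : Int) := by omega
      rw [this, hcast]
      exact dvd_sub hdvdZ dvd_rfl
  rw [hcard]
  have herase : (y + 1).divisors.filter (fun d => 2 ≤ d) = (y + 1).divisors.erase 1 := by
    ext d
    simp only [Finset.mem_filter, Finset.mem_erase, Nat.mem_divisors]
    constructor
    · rintro ⟨hmem, h2⟩; exact ⟨by omega, hmem⟩
    · rintro ⟨h1, hmem⟩
      have := Nat.pos_of_mem_divisors (Nat.mem_divisors.2 hmem)
      exact ⟨hmem, by omega⟩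
  have h1mem : (1 : ℕ) ∈ (y + 1).divisors := Nat.one_mem_divisors.2 hN0
  rw [herase, Finset.card_erase_of_mem h1mem]
  have hpos : 0 < (y + 1).divisors.card := Finset.card_pos.2 ⟨1, h1mem⟩
  rw [← odd_card_divisors_iff (y + 1) hN0]
  constructor
  · rintro ⟨t, ht⟩
    exact ⟨t, by omega⟩
  · rintro ⟨t, ht⟩
    exact ⟨t, by omega⟩

-- ===== B-side characterization =====

theorem mailboxAltGo_acc (n k : Int) (acc : List Int) :
    mailboxAltGo n k acc = acc ++ mailboxAltGo n k [] := by
  have H : ∀ (fuel : Nat) (n k : Int), (n + 2 - k).toNat ≤ fuel →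
      ∀ acc : List Int, mailboxAltGo n k acc = acc ++ mailboxAltGo n k [] := by
    intro fuel
    induction fuel with
    | zero =>
      intro n k h acc
      have hk := pvSelfLeSq k
      conv_lhs => rw [mailboxAltGo]
      conv_rhs => rw [mailboxAltGo]
      rw [if_neg (by omega), if_neg (by omega)]
      simp
    | succ fuel ih =>
      intro n k h acc
      conv_lhs => rw [mailboxAltGo]
      conv_rhs => rw [mailboxAltGo]
      by_cases hc : k * k - 1 ≤ n
      · have hk := pvSelfLeSq k
        rw [if_pos hc, if_pos hc,
          ih n (k + 1) (by omega) (acc ++ [k * k - 1]),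
          ih n (k + 1) (by omega) ([] ++ [k * k - 1])]
        simp
      · rw [if_neg hc, if_neg hc]
        simp
  exact H (n + 2 - k).toNat n k le_rfl acc

theorem mailboxAltGo_unfold (n k : Int) :
    mailboxAltGo n k [] =
      if k * k - 1 ≤ n then (k * k - 1) :: mailboxAltGo n (k + 1) [] else [] := by
  conv_lhs => rw [mailboxAltGo]
  by_cases hc : k * k - 1 ≤ n
  · rw [if_pos hc, if_pos hc, mailboxAltGo_acc]
    simp
  · rw [if_neg hc, if_neg hc]

theorem mem_mailboxAltGo (n k x : Int) (hk : 2 ≤ k) :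
    x ∈ mailboxAltGo n k [] ↔ ∃ j : Int, k ≤ j ∧ x = j * j - 1 ∧ x ≤ n := by
  have H : ∀ (fuel : Nat) (k : Int), (n + 2 - k).toNat ≤ fuel → 2 ≤ k → ∀ x : Int,
      (x ∈ mailboxAltGo n k [] ↔ ∃ j : Int, k ≤ j ∧ x = j * j - 1 ∧ x ≤ n) := by
    intro fuel
    induction fuel with
    | zero =>
      intro k h hk2 x
      have hkk := pvSelfLeSq k
      rw [mailboxAltGo_unfold, if_neg (by omega)]
      simp only [List.not_mem_nil, false_iff]
      rintro ⟨j, hj, rfl, hle⟩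
      have : k * k ≤ j * j := mul_le_mul hj hj (by omega) (by omega)
      omega
    | succ fuel ih =>
      intro k h hk2 x
      rw [mailboxAltGo_unfold]
      by_cases hc : k * k - 1 ≤ n
      · rw [if_pos hc]
        have hkk := pvSelfLeSq k
        rw [List.mem_cons, ih (k + 1) (by omega) (by omega) x]
        constructor
        · rintro (rfl | ⟨j, hj, rfl, hle⟩)
          · exact ⟨k, le_rfl, rfl, hc⟩
          · exact ⟨j, by omega, rfl, hle⟩
        · rintro ⟨j, hj, rfl, hle⟩
          rcases eq_or_lt_of_le hj with rfl | hlt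
          · exact Or.inl rfl
          · exact Or.inr ⟨j, by omega, rfl, hle⟩
      · rw [if_neg hc]
        simp only [List.not_mem_nil, false_iff]
        rintro ⟨j, hj, rfl, hle⟩
        have : k * k ≤ j * j := mul_le_mul hj hj (by omega) (by omega)
        omega
  exact H (n + 2 - k).toNat k le_rfl hk x

theorem pairwise_mailboxAltGo (n k : Int) (hk : 2 ≤ k) :
    (mailboxAltGo n k []).Pairwise (· < ·) := by
  have H : ∀ (fuel : Nat) (k : Int), (n + 2 - k).toNat ≤ fuel → 2 ≤ k →
      (mailboxAltGo n k []).Pairwise (· < ·) := by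
    intro fuel
    induction fuel with
    | zero =>
      intro k h hk2
      have hkk := pvSelfLeSq k
      rw [mailboxAltGo_unfold, if_neg (by omega)]
      exact List.Pairwise.nil
    | succ fuel ih =>
      intro k h hk2
      rw [mailboxAltGo_unfold]
      by_cases hc : k * k - 1 ≤ n
      · rw [if_pos hc]
        have hkk := pvSelfLeSq k
        refine List.Pairwise.cons ?_ (ih (k + 1) (by omega) (by omega))
        intro x hx
        rw [mem_mailboxAltGo n (k + 1) x (by omega)] at hx
        obtain ⟨j, hj, rfl, _⟩ := hx
        have : k * k < j * j := by nlinarith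
        omega
      · rw [if_neg hc]
        exact List.Pairwise.nil
  exact H (n + 2 - k).toNat k le_rfl hk

-- ===== assembly =====

theorem pvEnumerate_eq (bs : List Int) (s : Int) :
    PySem.List.enumerate bs s = (List.range bs.length).map (fun (i : Nat) => (s + (i : Int), bs.getD i 0)) := by
  induction bs generalizing s with
  | nil => simp [PySem.List.enumerate_nil]
  | cons x xs ih =>
    rw [PySem.List.enumerate_cons, ih (s + 1), List.length_cons, List.range_succ_eq_map]
    simp only [List.map_cons, List.map_map, Function.comp_def, Nat.cast_zero, add_zero,
      List.getD_cons_zero, List.getD_cons_succ]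
    refine congrArg (fun t => (s, x) :: t) ?_
    refine List.map_congr_left ?_
    intro i _
    simp
    ring

-- proof-only description of A's final list: the boxes y < M with y+1 a perfect square
def pvSqList (M : Nat) : List Int :=
  ((List.range M).filter (fun y => decide (IsSquare (y + 1)))).map (fun (y : Nat) => ((y : Int)))

theorem mailbox_eq_sqList (n : Int) : mailbox n = (pvSqList ((n + 1).toNat)).tail := by
  unfold mailbox
  simp only [List.length_replicate]
  rw [foldl_const]
  rw [PySem.List.length_pyRange_one]
  have hM : (((n + 1).toNat : Int) - 0).toNat = (n + 1).toNat := by omega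
  rw [hM]
  set M : Nat := (n + 1).toNat with hMdef
  have hLt : ((M : Int)).toNat = M := by omega
  obtain ⟨hiter, hlen, hval⟩ := pvOuter_iterate (M : Int) (by omega) M
  rw [hLt] at hiter hlen hval
  set B : List Int := ((pvOuterStep (M : Int))^[M] (0, 1, List.replicate M 0)).2.2 with hBdef
  rw [PySem.List.slice_from_one]
  rw [PySem.List.foldl_append_ite (p := fun (pr : Int × Int) => pr.2 = 0) (f := Prod.fst)]
  rw [pvEnumerate_eq B 0, hlen, List.filter_map, List.map_map]
  unfold pvSqList
  congr 1
  rw [List.filter_congr (q := fun (y : Nat) => decide (IsSquare (y + 1)))]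
  · refine List.map_congr_left ?_
    intro i _
    simp
  · intro i hi
    rw [List.mem_range] at hi
    simp only [Function.comp_def, decide_eq_decide]
    rw [hval i]
    have := even_togCount_iff (M : Int) i (by omega)
    rw [hLt] at this
    constructor
    · intro h0
      by_cases hev : Even (pvTogCount (↑M) M i)
      · exact this.1 hev
      · simp [hev] at h0
    · intro hsq
      rw [if_pos (this.2 hsq)]

theorem sqList_tail_eq_alt (n : Int) : (pvSqList ((n + 1).toNat)).tail = mailbox_alt n := by
  rw [mailbox_alt]
  by_cases hM0 : (n + 1).toNat = 0
  · rw [hM0]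
    rw [mailboxAltGo_unfold, if_neg (by omega)]
    rfl
  · obtain ⟨M', hM'⟩ : ∃ M', (n + 1).toNat = M' + 1 := ⟨(n + 1).toNat - 1, by omega⟩
    have hn0 : 0 ≤ n := by omega
    have hMn : (M' : Int) = n := by omega
    rw [hM', pvSqList, List.range_succ_eq_map]
    rw [List.filter_cons_of_pos (by simp)]
    rw [List.filter_map, List.map_cons, List.tail_cons, List.map_map]
    set T : List Int := ((List.range M').filter ((fun y => decide (IsSquare (y + 1))) ∘ Nat.succ)).map
        ((fun (y : Nat) => ((y : Int))) ∘ Nat.succ) with hT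
    -- both sides are strictly increasing lists with the same members
    have hpairT : T.Pairwise (· < ·) := by
      rw [hT, List.pairwise_map]
      refine List.Pairwise.filter _ ?_
      refine (List.pairwise_lt_range).imp ?_
      intro a b hab
      simp only [Function.comp_def]
      omega
    have hpairG : (mailboxAltGo n 2 []).Pairwise (· < ·) := pairwise_mailboxAltGo n 2 le_rfl
    have hmem : ∀ x : Int, x ∈ T ↔ x ∈ mailboxAltGo n 2 [] := by
      intro x
      rw [mem_mailboxAltGo n 2 x le_rfl, hT]
      simp only [List.mem_map, List.mem_filter, List.mem_range, Function.comp_def,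
        decide_eq_true_eq]
      constructor
      · rintro ⟨y, ⟨hyM, ⟨r, hr⟩⟩, rfl⟩
        have hr2 : y + 2 = r * r := by omega
        have hrge : 2 ≤ r := by nlinarith
        have hcast : ((y : Int)) + 2 = (r : Int) * (r : Int) := by exact_mod_cast hr2
        refine ⟨(r : Int), by exact_mod_cast hrge, ?_, by push_cast; omega⟩
        push_cast
        linarith
      · rintro ⟨j, hj2, rfl, hle⟩
        have hj' : j = ((j.toNat : Int)) := by omega
        set r := j.toNat with hrdef
        have hr2 : 2 ≤ r := by omega
        have hjr : (r : Int) * (r : Int) = j * j := by rw [← hj']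
        -- j*j - 1 ≤ n = M', so r*r ≤ M' + 1 in ℕ
        have hleN : r * r ≤ M' + 1 := by
          have : (r : Int) * (r : Int) ≤ (M' : Int) + 1 := by linarith
          exact_mod_cast this
        have h4 : 4 ≤ r * r := Nat.mul_le_mul hr2 hr2
        refine ⟨r * r - 2, ⟨by omega, ⟨r, by omega⟩⟩, ?_⟩
        push_cast [Nat.cast_sub (by omega : 2 ≤ r * r)]
        linarith
    refine List.Perm.eq_of_pairwise (fun a b _ _ hab hba => absurd hba (not_lt_of_gt hab))
      hpairT hpairG ?_
    exact (List.perm_ext_iff_of_nodup (hpairT.imp ne_of_lt) (hpairG.imp ne_of_lt)).2 hmem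

theorem mailbox_eq (n : Int) : mailbox n = mailbox_alt n :=
  (mailbox_eq_sqList n).trans (sqList_tail_eq_alt n)

-- ===== VERDICT (by name: the statement is the Claim_ definition above) =====
theorem mailbox_spec : Claim_equal_mailbox := by
  intro n _ ; exact mailbox_eq n
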